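-- pv_equiv track=rewrite | github.com/joseaverde/TFG | code/c++/tests/test-validation.py | get_ranges_of
-- ===== SOURCE A (Python) =====
-- def get_ranges_of (data : list[bool], offset : int) -> list[tuple[int, int]]:
--     last = False;
--     result = []
--     for i in range(len(data)):
--         if data[i] and not last:
--             result.append([i + offset, -1])
--         elif not data[i] and last:
--             result[-1][-1] = i + offset
--         last = data[i]
--     if last:
--         result[-1][-1] = offset + len(data)
--     return result
-- ===== SOURCE B (Python) =====
-- def get_ranges_of(data: list[bool], offset: int) -> list[tuple[int, int]]:
--     n = len(data)
--     starts = [i + offset for i in range(n) if data[i] and (i == 0 or not data[i - 1])]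
--     ends = [i + offset for i in range(n) if not data[i] and i > 0 and data[i - 1]]
--     if n and data[n - 1]:
--         ends.append(n + offset)
--     return [[s, e] for s, e in zip(starts, ends)]
-- ===== Notes on version B (the rewrite author's own statement) =====
-- stated objective: alternative
-- what changed: Replaces the running last-flag scan that appends [start,-1] and patches the last element on a falling edge by edge detection: collect rising-edge indices and falling-edge indices (with an implicit trailing False closing a final open run) in two comprehensions and zip them into [start,end] pairs.
import Mathlib
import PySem

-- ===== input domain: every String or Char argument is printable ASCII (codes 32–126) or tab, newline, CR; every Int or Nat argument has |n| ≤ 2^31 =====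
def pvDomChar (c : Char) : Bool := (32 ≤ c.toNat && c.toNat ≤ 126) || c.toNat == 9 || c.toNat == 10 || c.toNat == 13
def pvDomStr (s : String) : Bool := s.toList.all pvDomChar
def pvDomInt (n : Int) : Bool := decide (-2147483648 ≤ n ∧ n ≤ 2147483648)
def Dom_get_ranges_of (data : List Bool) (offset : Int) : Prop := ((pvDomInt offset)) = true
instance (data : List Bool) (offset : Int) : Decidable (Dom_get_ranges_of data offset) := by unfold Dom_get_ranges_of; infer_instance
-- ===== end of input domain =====

-- B replaces A's running last-flag scan (append [start,-1], patch on falling edge) by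
-- edge detection: two filtered index lists (rising/falling edges) zipped into pairs;
-- same O(n) cost, alternative decomposition. A returns mutable [start,end] lists; the
-- equivalence here is about the returned values.

-- ===== PORT A =====
-- result[-1][-1] = v  (res is always nonempty where A executes this)
def pvSetLastSnd (res : List (Int × Int)) (v : Int) : List (Int × Int) :=
  match res with
  | [] => []
  | [p] => [(p.1, v)]
  | p :: ps => p :: pvSetLastSnd ps v

-- the body of A's for-loop, state = (last, result)
def get_ranges_of_step (data : List Bool) (offset : Int)
    (st : Bool × List (Int × Int)) (i : Nat) : Bool × List (Int × Int) :=
  let last := st.1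
  let result := st.2
  let di := data.getD i false
  let result :=
    if di && !last then result ++ [((i : Int) + offset, -1)]
    else if !di && last then pvSetLastSnd result ((i : Int) + offset)
    else result
  (di, result)

def get_ranges_of (data : List Bool) (offset : Int) : List (Int × Int) :=
  let st := (List.range data.length).foldl (get_ranges_of_step data offset) (false, [])
  if st.1 then pvSetLastSnd st.2 (offset + (data.length : Int)) else st.2

-- ===== PORT B =====
-- rising edge: data[i] and (i == 0 or not data[i-1])
def pvRise (data : List Bool) (i : Nat) : Bool :=
  data.getD i false && (decide (i = 0) || !(data.getD (i - 1) false))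

-- falling edge: not data[i] and i > 0 and data[i-1]
def pvFall (data : List Bool) (i : Nat) : Bool :=
  !(data.getD i false) && decide (0 < i) && data.getD (i - 1) false

-- starts: rising-edge indices < n, shifted by offset
def pvS (data : List Bool) (offset : Int) (n : Nat) : List Int :=
  ((List.range n).filter (pvRise data)).map (fun i => (i : Int) + offset)

-- ends: falling-edge indices < n, shifted by offset
def pvE (data : List Bool) (offset : Int) (n : Nat) : List Int :=
  ((List.range n).filter (pvFall data)).map (fun i => (i : Int) + offset)

def get_ranges_of_alt (data : List Bool) (offset : Int) : List (Int × Int) :=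
  let n := data.length
  let starts := pvS data offset n
  let ends := pvE data offset n
  let ends := if decide (n ≠ 0) && data.getD (n - 1) false then ends ++ [(n : Int) + offset] else ends
  starts.zip ends

-- ===== PRECONDITION & SPEC =====
def Spec_get_ranges_of (data : List Bool) (offset : Int) (out : List (Int × Int)) : Prop := out = get_ranges_of_alt data offset
instance (data : List Bool) (offset : Int) (out : List (Int × Int)) : Decidable (Spec_get_ranges_of data offset out) := by unfold Spec_get_ranges_of; infer_instance

-- ===== CLAIM (what is proved, stated in full; the proofs are below) =====
def Claim_equal_get_ranges_of : Prop := ∀ (data : List Bool) (offset : Int), Dom_get_ranges_of data offset → Spec_get_ranges_of data offset (get_ranges_of data offset)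

-- ===== LEMMAS AND PROOFS =====

-- pair starts with ends, the one unmatched start (if any) getting the -1 placeholder
def pvPairUp : List Int → List Int → List (Int × Int)
  | s :: ss, e :: es => (s, e) :: pvPairUp ss es
  | s :: ss, [] => (s, -1) :: pvPairUp ss []
  | [], _ => []

def pvFlag (data : List Bool) (n : Nat) : Bool :=
  if n = 0 then false else data.getD (n - 1) false

theorem pvPairUp_zip : ∀ (ss es : List Int), ss.length = es.length → pvPairUp ss es = ss.zip es := by
  intro ss
  induction ss with
  | nil => intro es _; simp [pvPairUp]
  | cons s ss ih =>
    intro es h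
    cases es with
    | nil => simp at h
    | cons e es => simp [pvPairUp, List.zip]; exact ih es (by simpa using h)

theorem pvPairUp_append_start : ∀ (ss es : List Int) (s : Int), ss.length = es.length →
    pvPairUp (ss ++ [s]) es = pvPairUp ss es ++ [(s, -1)] := by
  intro ss
  induction ss with
  | nil =>
    intro es s h
    cases es with
    | nil => simp [pvPairUp]
    | cons e es => simp at h
  | cons a ss ih =>
    intro es s h
    cases es with
    | nil => simp at h
    | cons e es => simp [pvPairUp]; exact ih es s (by simpa using h)

theorem pvSetLastSnd_pairUp : ∀ (ss es : List Int) (v : Int), ss.length = es.length + 1 →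
    pvSetLastSnd (pvPairUp ss es) v = pvPairUp ss (es ++ [v]) := by
  intro ss
  induction ss with
  | nil => intro es v h; simp at h
  | cons s ss ih =>
    intro es v h
    cases es with
    | nil =>
      cases ss with
      | nil => simp [pvPairUp, pvSetLastSnd]
      | cons b bs => simp at h
    | cons e es =>
      have h' : ss.length = es.length + 1 := by simpa using h
      have hne : pvPairUp ss es ≠ [] := by
        cases ss with
        | nil => simp at h'
        | cons b bs => cases es <;> simp [pvPairUp]
      calc pvSetLastSnd (pvPairUp (s :: ss) (e :: es)) v
          = (s, e) :: pvSetLastSnd (pvPairUp ss es) v := by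
            simp only [pvPairUp]
            cases hpp : pvPairUp ss es with
            | nil => exact absurd hpp hne
            | cons q qs => simp [pvSetLastSnd]
        _ = pvPairUp (s :: ss) ((e :: es) ++ [v]) := by
            simp [pvPairUp, ih es v h']

theorem pvS_succ (data : List Bool) (offset : Int) (n : Nat) :
    pvS data offset (n + 1) =
      if pvRise data n then pvS data offset n ++ [(n : Int) + offset] else pvS data offset n := by
  simp only [pvS, List.range_succ, List.filter_append, List.filter_cons]
  split_ifs with h <;> simp

theorem pvE_succ (data : List Bool) (offset : Int) (n : Nat) :
    pvE data offset (n + 1) =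
      if pvFall data n then pvE data offset n ++ [(n : Int) + offset] else pvE data offset n := by
  simp only [pvE, List.range_succ, List.filter_append, List.filter_cons]
  split_ifs with h <;> simp

theorem pvRise_eq (data : List Bool) (n : Nat) :
    pvRise data n = (data.getD n false && !pvFlag data n) := by
  unfold pvRise pvFlag
  by_cases h : n = 0 <;> simp [h]

theorem pvFall_eq (data : List Bool) (n : Nat) :
    pvFall data n = (!(data.getD n false) && pvFlag data n) := by
  unfold pvFall pvFlag
  by_cases h : n = 0 <;> simp [h, Nat.pos_of_ne_zero]

theorem pv_inv (data : List Bool) (offset : Int) : ∀ n : Nat,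
    (List.range n).foldl (get_ranges_of_step data offset) (false, []) =
      (pvFlag data n, pvPairUp (pvS data offset n) (pvE data offset n)) ∧
    (pvS data offset n).length = (pvE data offset n).length + (cond (pvFlag data n) 1 0) := by
  intro n
  induction n with
  | zero => simp [pvFlag, pvS, pvE, pvPairUp]
  | succ n ih =>
    obtain ⟨hfold, hlen⟩ := ih
    have hstep : (List.range (n + 1)).foldl (get_ranges_of_step data offset) (false, []) =
        get_ranges_of_step data offset
          (pvFlag data n, pvPairUp (pvS data offset n) (pvE data offset n)) n := by
      rw [List.range_succ, List.foldl_append, hfold]; simp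
    have hflag1 : pvFlag data (n + 1) = data.getD n false := by simp [pvFlag]
    rw [hstep, pvS_succ, pvE_succ, pvRise_eq, pvFall_eq, hflag1]
    unfold get_ranges_of_step
    cases hd : data.getD n false <;> cases hf : pvFlag data n <;>
      simp [hf] at hlen ⊢
    · exact hlen
    · -- d = false, f = true : falling edge
      exact ⟨pvSetLastSnd_pairUp _ _ _ hlen, by simp [hlen]⟩
    · -- d = true, f = false : rising edge
      exact ⟨(pvPairUp_append_start _ _ _ hlen).symm, by simp [hlen]⟩
    · exact hlen

theorem pvFlag_guard (data : List Bool) :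
    (decide (data.length ≠ 0) && data.getD (data.length - 1) false) = pvFlag data data.length := by
  unfold pvFlag
  by_cases h : data.length = 0 <;> simp [h]

-- ===== VERDICT (by name: the statement is the Claim_ definition above) =====

theorem get_ranges_of_spec : Claim_equal_get_ranges_of := by
  intro data offset _
  unfold Spec_get_ranges_of get_ranges_of get_ranges_of_alt
  obtain ⟨hfold, hlen⟩ := pv_inv data offset data.length
  simp only [hfold, pvFlag_guard]
  cases hf : pvFlag data data.length
  · simp only [hf, Bool.false_eq_true, if_false, Bool.cond_false, Nat.add_zero] at hlen ⊢
    exact pvPairUp_zip _ _ hlen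
  · simp only [hf, if_true, Bool.cond_true] at hlen ⊢
    rw [pvSetLastSnd_pairUp _ _ _ hlen, pvPairUp_zip _ _ (by simp [hlen]), Int.add_comm offset]
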